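-- pv_equiv track=rewrite | github.com/mailin89w/halfFull | evals/2026-03-kidney-inflam-recovery/audit_kidney_fps.py | classify_fp
-- ===== SOURCE A (Python) =====
-- METABOLIC_CONDITIONS = {
--     "prediabetes", "iron_deficiency", "vitamin_d_deficiency", "anemia",
-- }
--
-- HYPERTENSIVE_CONDITIONS = {
--     "electrolyte_imbalance", "cardiovascular",
-- }
--
-- def classify_fp(expected_conditions: list[str]) -> str:
--     """Return one of: healthy | metabolic | hypertensive | other."""
--     conds = set(c.lower() for c in expected_conditions)
--     if not conds:
--         return "healthy"
--     if conds & HYPERTENSIVE_CONDITIONS: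
--         return "hypertensive"
--     if conds & METABOLIC_CONDITIONS:
--         return "metabolic"
--     return "other"
-- ===== SOURCE B (Python) =====
-- _RANK = {
--     "electrolyte_imbalance": 0, "cardiovascular": 0,
--     "prediabetes": 1, "iron_deficiency": 1,
--     "vitamin_d_deficiency": 1, "anemia": 1,
-- }
-- _LABELS = ("hypertensive", "metabolic", "other")
--
-- def classify_fp(expected_conditions: list[str]) -> str:
--     """Return one of: healthy | metabolic | hypertensive | other."""
--     if not expected_conditions:
--         return "healthy"
--     return _LABELS[min(_RANK.get(c.lower(), 2) for c in expected_conditions)]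
-- ===== Notes on version B (the rewrite author's own statement) =====
-- stated objective: alternative
-- what changed: Replaces the set-build-plus-two-intersections priority chain by a numeric rank map: each condition is mapped to a priority rank (0 hypertensive, 1 metabolic, 2 other) through one dict, the answer is the label for the minimum rank.
import Mathlib
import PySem

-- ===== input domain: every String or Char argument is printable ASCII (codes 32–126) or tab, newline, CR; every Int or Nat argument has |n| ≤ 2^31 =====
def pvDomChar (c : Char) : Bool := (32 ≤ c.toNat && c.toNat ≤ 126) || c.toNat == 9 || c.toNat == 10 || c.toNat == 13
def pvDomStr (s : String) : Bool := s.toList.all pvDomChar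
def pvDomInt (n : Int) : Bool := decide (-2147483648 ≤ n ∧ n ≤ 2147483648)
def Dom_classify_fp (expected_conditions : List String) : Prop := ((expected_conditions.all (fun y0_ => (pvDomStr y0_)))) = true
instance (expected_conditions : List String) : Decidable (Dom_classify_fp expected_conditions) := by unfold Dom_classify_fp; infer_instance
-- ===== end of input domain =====

-- B replaces A's set-build plus two set intersections by a numeric priority-rank map
-- (0 hypertensive, 1 metabolic, 2 other): one dict lookup per element, min rank wins
-- (objective: alternative decomposition, same cost).

-- ===== PORT A =====
def METABOLIC_CONDITIONS : PySem.Set String :=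
  PySem.Set.ofList ["prediabetes", "iron_deficiency", "vitamin_d_deficiency", "anemia"]

def HYPERTENSIVE_CONDITIONS : PySem.Set String :=
  PySem.Set.ofList ["electrolyte_imbalance", "cardiovascular"]

def classify_fp (expected_conditions : List String) : String :=
  let conds : PySem.Set String := PySem.Set.ofList (expected_conditions.map PySem.Str.lower)
  if conds = [] then "healthy"
  else if PySem.Set.inter conds HYPERTENSIVE_CONDITIONS ≠ [] then "hypertensive"
  else if PySem.Set.inter conds METABOLIC_CONDITIONS ≠ [] then "metabolic"
  else "other"

-- ===== PORT B =====
def RANK : PySem.Dict String Int :=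
  PySem.Dict.ofList [("electrolyte_imbalance", 0), ("cardiovascular", 0),
    ("prediabetes", 1), ("iron_deficiency", 1), ("vitamin_d_deficiency", 1), ("anemia", 1)]

def LABELS : List String := ["hypertensive", "metabolic", "other"]

def classify_fp_alt (expected_conditions : List String) : String :=
  if expected_conditions = [] then "healthy"
  else
    -- min(generator) over the ranks; the min is in {0,1,2} so the index never fails
    match PySem.List.min?
        (expected_conditions.map (fun c => RANK.getD (PySem.Str.lower c) 2))
        (fun x => x) with
    | some m => (PySem.List.pyGet? LABELS m).getD ""
    | none => ""  -- unreachable: the list is nonempty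

-- ===== PRECONDITION & SPEC =====
def Spec_classify_fp (expected_conditions : List String) (out : String) : Prop := out = classify_fp_alt expected_conditions
instance (expected_conditions : List String) (out : String) : Decidable (Spec_classify_fp expected_conditions out) := by unfold Spec_classify_fp; infer_instance

-- ===== CLAIM (what is proved, stated in full; the proofs are below) =====
def Claim_equal_classify_fp : Prop := ∀ (expected_conditions : List String), Dom_classify_fp expected_conditions → Spec_classify_fp expected_conditions (classify_fp expected_conditions)

-- ===== LEMMAS AND PROOFS =====

theorem rankForm (s : String) :
    RANK.getD s 2 =
      if s ∈ HYPERTENSIVE_CONDITIONS then 0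
      else if s ∈ METABOLIC_CONDITIONS then 1
      else 2 := by
  have hR : RANK = PySem.Dict.mk [("electrolyte_imbalance", 0), ("cardiovascular", 0),
      ("prediabetes", 1), ("iron_deficiency", 1), ("vitamin_d_deficiency", 1),
      ("anemia", 1)] := by decide
  rw [hR]
  simp only [PySem.Dict.getD, PySem.Dict.get?_mk_cons, beq_iff_eq,
    HYPERTENSIVE_CONDITIONS, METABOLIC_CONDITIONS, PySem.Set.ofList]
  split_ifs <;> simp_all [PySem.Dict.get?, eq_comm]

theorem rankCases (s : String) :
    RANK.getD s 2 = 0 ∨ RANK.getD s 2 = 1 ∨ RANK.getD s 2 = 2 := by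
  rw [rankForm]; split_ifs <;> simp

theorem rankZeroIff (s : String) :
    RANK.getD s 2 = 0 ↔ s ∈ HYPERTENSIVE_CONDITIONS := by
  rw [rankForm]; split_ifs <;> simp_all

theorem rankOneIff (s : String) :
    RANK.getD s 2 = 1 ↔ (s ∉ HYPERTENSIVE_CONDITIONS ∧ s ∈ METABOLIC_CONDITIONS) := by
  rw [rankForm]; split_ifs <;> simp_all

theorem foldl_min_rank (l : List String) (a : Int) (ha : a = 0 ∨ a = 1 ∨ a = 2) :
    ((l.map (fun c => RANK.getD (PySem.Str.lower c) 2)).foldl min a) =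
      if a = 0 ∨ (∃ c ∈ l, RANK.getD (PySem.Str.lower c) 2 = 0) then 0
      else if a = 1 ∨ (∃ c ∈ l, RANK.getD (PySem.Str.lower c) 2 = 1) then 1
      else 2 := by
  induction l generalizing a with
  | nil =>
    rcases ha with h | h | h <;> simp [h]
  | cons c t ih =>
    have hc := rankCases (PySem.Str.lower c)
    have hmin : min a (RANK.getD (PySem.Str.lower c) 2) = 0 ∨
        min a (RANK.getD (PySem.Str.lower c) 2) = 1 ∨
        min a (RANK.getD (PySem.Str.lower c) 2) = 2 := by
      rcases ha with h | h | h <;> rcases hc with h' | h' | h' <;> simp [h, h']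
    simp only [List.map_cons, List.foldl_cons, ih _ hmin]
    rcases ha with h | h | h <;> rcases hc with h' | h' | h' <;> simp_all

theorem inter_ne_nil_iff (ec : List String) (t : List String) :
    ((PySem.Set.ofList (ec.map PySem.Str.lower)).inter t ≠ []) ↔
      (∃ x ∈ ec, PySem.Str.lower x ∈ t) := by
  rw [ne_eq, List.eq_nil_iff_forall_not_mem]
  simp [PySem.Set.mem_inter, PySem.Set.mem_ofList]

theorem altChar (c : String) (rest : List String) :
    classify_fp_alt (c :: rest) =
      if (∃ x ∈ (c :: rest), PySem.Str.lower x ∈ HYPERTENSIVE_CONDITIONS) then "hypertensive"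
      else if (∃ x ∈ (c :: rest), PySem.Str.lower x ∈ METABOLIC_CONDITIONS) then "metabolic"
      else "other" := by
  unfold classify_fp_alt
  rw [if_neg (by simp), List.map_cons, PySem.List.min?_id_cons,
    foldl_min_rank rest (RANK.getD (PySem.Str.lower c) 2) (rankCases _)]
  have hex0 : (RANK.getD (PySem.Str.lower c) 2 = 0 ∨
        ∃ x ∈ rest, RANK.getD (PySem.Str.lower x) 2 = 0) ↔
      (∃ x ∈ (c :: rest), PySem.Str.lower x ∈ HYPERTENSIVE_CONDITIONS) := by
    simp [rankZeroIff]
  by_cases h0 : ∃ x ∈ (c :: rest), PySem.Str.lower x ∈ HYPERTENSIVE_CONDITIONS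
  · rw [if_pos (hex0.mpr h0), if_pos h0]; rfl
  · rw [if_neg (fun h => h0 (hex0.mp h)), if_neg h0]
    by_cases h1 : ∃ x ∈ (c :: rest), PySem.Str.lower x ∈ METABOLIC_CONDITIONS
    · have hone : (RANK.getD (PySem.Str.lower c) 2 = 1 ∨
          ∃ x ∈ rest, RANK.getD (PySem.Str.lower x) 2 = 1) := by
        rcases h1 with ⟨x, hx, hm⟩
        have hh : PySem.Str.lower x ∉ HYPERTENSIVE_CONDITIONS := fun hc' => h0 ⟨x, hx, hc'⟩
        have hr := (rankOneIff (PySem.Str.lower x)).mpr ⟨hh, hm⟩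
        rcases List.mem_cons.mp hx with rfl | hx'
        · exact Or.inl hr
        · exact Or.inr ⟨x, hx', hr⟩
      rw [if_pos hone, if_pos h1]; rfl
    · have hone' : ¬ (RANK.getD (PySem.Str.lower c) 2 = 1 ∨
          ∃ x ∈ rest, RANK.getD (PySem.Str.lower x) 2 = 1) := by
        rintro (h | ⟨x, hx, h⟩)
        · exact h1 ⟨c, List.mem_cons_self .., ((rankOneIff _).mp h).2⟩
        · exact h1 ⟨x, List.mem_cons_of_mem _ hx, ((rankOneIff _).mp h).2⟩
      rw [if_neg hone', if_neg h1]; rfl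

-- ===== VERDICT (by name: the statement is the Claim_ definition above) =====
theorem classify_fp_spec : Claim_equal_classify_fp := by
  intro ec _
  unfold Spec_classify_fp
  rcases ec with _ | ⟨c, rest⟩
  · rfl
  · rw [altChar]
    show (if PySem.Set.ofList ((c :: rest).map PySem.Str.lower) = [] then "healthy"
      else if PySem.Set.inter (PySem.Set.ofList ((c :: rest).map PySem.Str.lower)) HYPERTENSIVE_CONDITIONS ≠ [] then "hypertensive"
      else if PySem.Set.inter (PySem.Set.ofList ((c :: rest).map PySem.Str.lower)) METABOLIC_CONDITIONS ≠ [] then "metabolic"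
      else "other") = _
    rw [if_neg (by simp [PySem.Set.ofList_cons])]
    simp only [inter_ne_nil_iff]
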